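-- pv_equiv track=rewrite | github.com/HSJung93/codingTest | 3_dfs_bfs.py | solution
-- ===== SOURCE A (Python) =====
-- from collections import deque
-- from collections import deque
-- from collections import deque
-- from collections import deque
-- from collections import deque
-- from collections import deque
-- from collections import deque
-- from collections import deque
--
-- def solution(conyPosition, brownPosition):
--
--     # 시간 변수를 따로 선언한다.
--     # while문 안에서 시간의 가속도를 표현할 수 있다.
--     time = 0
--     MAX = 2 * 10**5
--
--     # 큐를 만들고 초기값을 넣는다.
--     q = deque()
--     q.append((brownPosition, 0))
--
--     # 브라운이 visit에 도달한 시간을 dict에 넣어서 업데이트 해간다. 나중에 in으로 검색할 때 O(n) 빠르게 검색하도록 한다.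
--     # 초기값을 visit[0][0] = True로 visit에 세팅하지 않아도 잘 돌아간다.
--     visit = [{} for _ in range(MAX+1)]
--
--     # 적당히 돌려도 돌아간다. 가끔 그냥 True를 써서 돌려도 되는데 무한 루프 때문에 꺼려져서 안쓰는 경우가 있다.
--     while conyPosition <= MAX:
--
--         # 종료 조건과 관련된 거리 변수가 q에서 나오는 위치값과는 달리 함수적이지 않고 상수적으로 변화한다. 그래서 뽑기 전에 정의한다.
--         # 종료 조건 또한 뽑기 전이다.
--         conyPosition += time
--
--         # 종료 조건2: 보통 예외 조건이 더 강력하다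
--         if conyPosition > MAX:
--             return - 1
--
--         # 종료 조건1
--         if time in visit[conyPosition]: # 코니의 현 포지션에 브라운이 도착한 시간이 있다면
--             return time
--
--         #  q에 동시에 돌아가 있는 것을 for문으로 다 뽑는다. i는 필요 없다.
--         for _ in range(len(q)):
--             cur = q.popleft()
--             curPosition = cur[0]
--             # 값을 넣어두지 않으면 외부에 저장한 값에서 불러와야 하는데 외부에 저장한 값이 여러 개이기 때문에 나중에 그 중에 하나를 불러올 수가 없다. 외부 저장 리스트에 여러 값을 저장해야 문제를 풀 때(1대1이 아닐 때) 그 때 상태를 기록하기 위해서 값을 저장해둔다.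
--             newTime = cur[1]+1
--
--             for newPosition in (curPosition-1, curPosition+1, curPosition*2):
--                 if 0 <= newPosition <= MAX:
--
--                     # 외부 리스트에 걸린 시간 없데이트
--                     # True는 밸류 값이 필요해서 넣은 장식값
--                     visit[newPosition][newTime] = True
--
--                     # 시간도 같이 집어 넣는다.
--                     q.append((newPosition, newTime))
--
--         time += 1
-- ===== SOURCE B (Python) =====
-- def solution(conyPosition, brownPosition):
--     # Level-synchronous BFS with visited-state dedup: one list of Brown's distinct positions
--     # per time step plus a boolean membership array, instead of A's deque of all
--     # (position, time) paths (which can multiply by 3 each round) and per-cell time dicts.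
--     MAX = 2 * 10**5
--     reach = [False] * (MAX + 1)
--     frontier = []
--     for c in (brownPosition - 1, brownPosition + 1, 2 * brownPosition):
--         if 0 <= c <= MAX and not reach[c]:
--             reach[c] = True
--             frontier.append(c)
--     time = 1
--     while True:
--         conyPosition += time
--         if conyPosition > MAX:
--             return -1
--         if reach[conyPosition]:
--             return time
--         new_reach = [False] * (MAX + 1)
--         new_frontier = []
--         for p in frontier:
--             for c in (p - 1, p + 1, 2 * p):
--                 if 0 <= c <= MAX and not new_reach[c]:
--                     new_reach[c] = True
--                     new_frontier.append(c)
--         reach, frontier = new_reach, new_frontier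
--         time += 1
-- ===== Notes on version B (the rewrite author's own statement) =====
-- stated objective: faster
-- what changed: Replaced A's dedup-free deque of (position,time) paths (the queue can multiply by up to 3 each round) and per-cell arrival-time dicts with a level-synchronous BFS that keeps one list of Brown's distinct positions per time step plus a boolean membership array.
-- outside the precondition, e.g. on solution(300000, 5): A returns None, B returns -1
import Mathlib
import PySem

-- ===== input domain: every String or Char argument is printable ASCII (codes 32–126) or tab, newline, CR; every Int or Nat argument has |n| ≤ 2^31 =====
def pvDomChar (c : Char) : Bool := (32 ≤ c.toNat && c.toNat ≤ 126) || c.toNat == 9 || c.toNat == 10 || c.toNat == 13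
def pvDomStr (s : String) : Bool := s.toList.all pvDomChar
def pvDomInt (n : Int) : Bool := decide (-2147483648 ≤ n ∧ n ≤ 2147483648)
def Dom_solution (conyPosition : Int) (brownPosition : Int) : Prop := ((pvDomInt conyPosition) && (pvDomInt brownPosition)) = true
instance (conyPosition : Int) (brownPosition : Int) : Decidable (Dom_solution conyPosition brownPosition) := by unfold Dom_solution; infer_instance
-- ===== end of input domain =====

-- B replaces A's dedup-free deque of (position,time) paths (the queue can multiply each round)
-- and per-cell arrival-time dicts with a level-synchronous BFS that keeps one list of Brown's
-- distinct positions per time step plus a boolean membership array (objective: faster).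


-- ===== PORT A =====

-- MAX = 2 * 10**5
def pvMAX : Int := 2 * 10 ^ 5

-- Python indexes the list `visit` (length MAX+1) with `visit[conyPosition]`, where a negative
-- conyPosition in [-(MAX+1), -1] wraps by adding the length; exact everywhere A does not raise.
def pvVisitIdx (i : Int) : Int := if i < 0 then i + (pvMAX + 1) else i

-- inner loop: `for newPosition in (curPosition-1, curPosition+1, curPosition*2): if 0 <= newPosition <= MAX: ...`
-- (deque.append is O(1): the round's appends are accumulated with cons and reversed once per
-- round in pvLoopA, producing exactly Python's queue list)
def pvPush : List Int → Int → List (Int × Int) → Array (PySem.Dict Int Bool) →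
    List (Int × Int) × Array (PySem.Dict Int Bool)
  | [], _, qrev, visit => (qrev, visit)
  | newPosition :: rest, newTime, qrev, visit =>
      if 0 ≤ newPosition ∧ newPosition ≤ pvMAX then
        pvPush rest newTime ((newPosition, newTime) :: qrev)
          (visit.setIfInBounds newPosition.toNat
            ((visit.getD newPosition.toNat PySem.Dict.empty).insert newTime true))
      else pvPush rest newTime qrev visit

-- `for _ in range(len(q)): cur = q.popleft(); ...` — pops exactly the elements present at the
-- start of the round; the children appended during the round form the next round's queue.
def pvExpand : List (Int × Int) → List (Int × Int) → Array (PySem.Dict Int Bool) →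
    List (Int × Int) × Array (PySem.Dict Int Bool)
  | [], qrev, visit => (qrev, visit)
  | cur :: rest, qrev, visit =>
      let curPosition := cur.1
      let newTime := cur.2 + 1
      let st := pvPush [curPosition - 1, curPosition + 1, curPosition * 2] newTime qrev visit
      pvExpand rest st.1 st.2

-- `while conyPosition <= MAX:` — fuel 2000 is never exhausted on inputs satisfying Pre_solution
-- (Cony passes MAX after at most 896 rounds there); at fuel 0 we return -1, a value the claim
-- never relies on.
def pvLoopA (fuel : Nat) (conyPosition : Int) (time : Int) (q : List (Int × Int))
    (visit : Array (PySem.Dict Int Bool)) : Int :=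
  match fuel with
  | 0 => -1
  | fuel + 1 =>
    if conyPosition ≤ pvMAX then
      let conyPosition := conyPosition + time
      if conyPosition > pvMAX then -1
      else if ((visit.getD (pvVisitIdx conyPosition).toNat PySem.Dict.empty).get? time).isSome then time
      else
        let st := pvExpand q [] visit
        pvLoopA fuel conyPosition (time + 1) st.1.reverse st.2
    else -1  -- Python falls off the while loop and returns None; Pre_solution excludes this (conyPosition > MAX)

-- visit = [{} for _ in range(MAX+1)], modelled as an Array of MAX+1 empty Dicts
def solution (conyPosition : Int) (brownPosition : Int) : Int :=
  pvLoopA 2000 conyPosition 0 [(brownPosition, 0)] (Array.replicate 200001 PySem.Dict.empty)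

-- ===== PORT B =====

-- for c in (.., .., ..): if 0 <= c <= MAX and not new_reach[c]: new_reach[c] = True; new_frontier.append(c)
-- (list.append is O(1): appends are accumulated with cons and the level's list reversed once,
-- producing exactly Python's new_frontier list)
def pvChildB : List Int → Array Bool → List Int → Array Bool × List Int
  | [], newReach, newFrontier => (newReach, newFrontier)
  | c :: cs, newReach, newFrontier =>
      if (0 ≤ c ∧ c ≤ 200000) ∧ newReach.getD c.toNat false = false then
        pvChildB cs (newReach.setIfInBounds c.toNat true) (c :: newFrontier)
      else pvChildB cs newReach newFrontier

-- for p in frontier: ...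
def pvLevelB : List Int → Array Bool → List Int → Array Bool × List Int
  | [], newReach, newFrontier => (newReach, newFrontier)
  | p :: ps, newReach, newFrontier =>
      let st := pvChildB [p - 1, p + 1, 2 * p] newReach newFrontier
      pvLevelB ps st.1 st.2

-- `while True:` — same fuel bound as A's port (B starts at time = 1, one round after A);
-- `reach[conyPosition]` is Python list indexing, so a negative index wraps by the length 200001
-- (exact for conyPosition >= -200001, which Pre_solution guarantees).
def pvLoopB (fuel : Nat) (conyPosition : Int) (time : Int) (reach : Array Bool)
    (frontier : List Int) : Int :=
  match fuel with
  | 0 => -1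
  | fuel + 1 =>
    let conyPosition := conyPosition + time
    if conyPosition > 200000 then -1
    else if reach.getD (if conyPosition < 0 then conyPosition + 200001 else conyPosition).toNat false then time
    else
      let st := pvLevelB frontier (Array.replicate 200001 false) []
      pvLoopB fuel conyPosition (time + 1) st.1 st.2.reverse

def solution_alt (conyPosition : Int) (brownPosition : Int) : Int :=
  let st := pvChildB [brownPosition - 1, brownPosition + 1, 2 * brownPosition]
    (Array.replicate 200001 false) []
  pvLoopB 1999 conyPosition 1 st.1 st.2.reverse

-- ===== PRECONDITION & SPEC =====

-- Pre_ is exactly the set of inputs where Python A returns an int: for conyPosition > MAX = 200000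
-- A falls off its while loop and returns None (no int), and for conyPosition < -(MAX+1) the very
-- first `visit[conyPosition]` raises IndexError.
def Pre_solution (conyPosition : Int) (brownPosition : Int) : Prop :=
  -200001 ≤ conyPosition ∧ conyPosition ≤ 200000
instance (conyPosition : Int) (brownPosition : Int) : Decidable (Pre_solution conyPosition brownPosition) := by
  unfold Pre_solution; infer_instance

def pvWitness_solution : Int × Int := (1, 0)

def Spec_solution (conyPosition : Int) (brownPosition : Int) (out : Int) : Prop := out = solution_alt conyPosition brownPosition
instance (conyPosition : Int) (brownPosition : Int) (out : Int) : Decidable (Spec_solution conyPosition brownPosition out) := by unfold Spec_solution; infer_instance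

-- ===== CLAIM (what is proved, stated in full; the proofs are below) =====
def Claim_equal_solution : Prop := ∀ (conyPosition : Int) (brownPosition : Int), Dom_solution conyPosition brownPosition → Pre_solution conyPosition brownPosition → Spec_solution conyPosition brownPosition (solution conyPosition brownPosition)

-- ===== LEMMAS AND PROOFS =====

theorem pvMAX_eq : pvMAX = 200000 := by norm_num [pvMAX]

theorem pvVisitIdx_eq (i : Int) : pvVisitIdx i = if i < 0 then i + 200001 else i := by
  unfold pvVisitIdx; rw [pvMAX_eq]; norm_num

theorem getD_setIfInBounds {α : Type} (a : Array α) (d v : α) (i n : Nat) (hi : i < a.size) :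
    ((a.setIfInBounds i v).getD n d) = if n = i then v else a.getD n d := by
  simp only [Array.getD, Array.size_setIfInBounds, Array.getInternal_eq_getElem]
  by_cases hn : n < a.size
  · simp only [dif_pos hn]
    rw [Array.getElem_setIfInBounds]
    by_cases h : n = i
    · simp [h]
    · rw [if_neg (fun hh => h hh.symm), if_neg h]
  · rw [dif_neg hn, dif_neg hn, if_neg (by omega)]

theorem getD_replicate {α : Type} (k : Nat) (x d : α) (n : Nat) :
    ((Array.replicate k x).getD n d) = if n < k then x else d := by
  simp only [Array.getD, Array.size_replicate, Array.getInternal_eq_getElem]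
  by_cases hn : n < k
  · simp [hn]
  · simp [hn]

-- `p` can move Brown to `c` in one step (staying on the board)
def childOf (p c : Int) : Prop := (c = p - 1 ∨ c = p + 1 ∨ c = 2 * p) ∧ 0 ≤ c ∧ c ≤ 200000

theorem mem_three (p c : Int) : (c ∈ [p - 1, p + 1, p * 2] ∧ 0 ≤ c ∧ c ≤ 200000) ↔ childOf p c := by
  simp only [List.mem_cons, List.not_mem_nil, or_false, childOf]
  constructor
  · rintro ⟨h1, h2⟩; exact ⟨by omega, h2⟩
  · rintro ⟨h1, h2⟩; exact ⟨by omega, h2⟩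

-- whether time `u` has been recorded at cell `c` of A's visit array
def lkA (visit : Array (PySem.Dict Int Bool)) (c u : Int) : Bool :=
  ((visit.getD c.toNat PySem.Dict.empty).get? u).isSome

theorem lkA_def (visit : Array (PySem.Dict Int Bool)) (c u : Int) :
    ((visit.getD c.toNat PySem.Dict.empty).get? u).isSome = lkA visit c u := rfl

theorem lkA_replicate (c u : Int) :
    lkA (Array.replicate 200001 PySem.Dict.empty) c u = false := by
  unfold lkA
  rw [getD_replicate]
  by_cases h : c.toNat < 200001 <;> simp [h]

-- ---------- A-side: the queue/visit round ----------

theorem push_size (ps : List Int) (newTime : Int) (qrev : List (Int × Int))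
    (visit : Array (PySem.Dict Int Bool)) :
    (pvPush ps newTime qrev visit).2.size = visit.size := by
  induction ps generalizing qrev visit with
  | nil => rfl
  | cons p ps ih =>
    show (pvPush (p :: ps) newTime qrev visit).2.size = _
    rw [pvPush]
    split
    · rw [ih]; exact Array.size_setIfInBounds ..
    · exact ih ..

theorem push_spec_q (ps : List Int) (newTime : Int) (qrev : List (Int × Int))
    (visit : Array (PySem.Dict Int Bool)) (c t' : Int) :
    (c, t') ∈ (pvPush ps newTime qrev visit).1 ↔
      (c, t') ∈ qrev ∨ (t' = newTime ∧ c ∈ ps ∧ 0 ≤ c ∧ c ≤ 200000) := by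
  induction ps generalizing qrev visit with
  | nil => simp [pvPush]
  | cons p ps ih =>
    show (c, t') ∈ (pvPush (p :: ps) newTime qrev visit).1 ↔ _
    rw [pvPush, pvMAX_eq]
    split
    · rename_i h
      rw [ih]
      constructor
      · intro h'
        rcases h' with h' | h'
        · rcases List.mem_cons.1 h' with h'' | h''
          · simp only [Prod.mk.injEq] at h''
            exact Or.inr ⟨h''.2, List.mem_cons.2 (Or.inl h''.1), by omega, by omega⟩
          · exact Or.inl h''
        · exact Or.inr ⟨h'.1, List.mem_cons.2 (Or.inr h'.2.1), h'.2.2⟩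
      · intro h'
        rcases h' with h' | ⟨h1, h2, h3⟩
        · exact Or.inl (List.mem_cons.2 (Or.inr h'))
        · rcases List.mem_cons.1 h2 with h2 | h2
          · exact Or.inl (List.mem_cons.2 (Or.inl (by simp [h1, h2])))
          · exact Or.inr ⟨h1, h2, h3⟩
    · rename_i h
      rw [ih]
      constructor
      · intro h'
        rcases h' with h' | ⟨h1, h2, h3⟩
        · exact Or.inl h'
        · exact Or.inr ⟨h1, List.mem_cons.2 (Or.inr h2), h3⟩
      · intro h'
        rcases h' with h' | ⟨h1, h2, h3⟩
        · exact Or.inl h'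
        · rcases List.mem_cons.1 h2 with h2 | h2
          · exact absurd ⟨by omega, by omega⟩ h
          · exact Or.inr ⟨h1, h2, h3⟩

theorem push_spec_v (ps : List Int) (newTime : Int) (qrev : List (Int × Int))
    (visit : Array (PySem.Dict Int Bool)) (hsz : visit.size = 200001) (c u : Int) (hc : 0 ≤ c) :
    lkA (pvPush ps newTime qrev visit).2 c u = true ↔
      lkA visit c u = true ∨ (u = newTime ∧ c ∈ ps ∧ 0 ≤ c ∧ c ≤ 200000) := by
  induction ps generalizing qrev visit with
  | nil => simp [pvPush]
  | cons p ps ih =>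
    show lkA (pvPush (p :: ps) newTime qrev visit).2 c u = true ↔ _
    rw [pvPush, pvMAX_eq]
    split
    · rename_i h
      rw [ih _ _ (by rw [Array.size_setIfInBounds]; exact hsz)]
      have hlk : lkA (visit.setIfInBounds p.toNat
            ((visit.getD p.toNat PySem.Dict.empty).insert newTime true)) c u = true ↔
          (c = p ∧ u = newTime) ∨ lkA visit c u = true := by
        unfold lkA
        rw [getD_setIfInBounds _ _ _ _ _ (by omega)]
        by_cases hcp : c.toNat = p.toNat
        · have hcp' : c = p := by omega
          rw [if_pos hcp, PySem.Dict.get?_insert]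
          by_cases hu : u = newTime <;> simp [hu, hcp']
        · rw [if_neg hcp]
          have : ¬ c = p := by omega
          simp [this]
      rw [hlk]
      constructor
      · intro h'
        rcases h' with (⟨h1, h2⟩ | hv) | ⟨h1, h2, h3⟩
        · exact Or.inr ⟨h2, List.mem_cons.2 (Or.inl h1), by omega, by omega⟩
        · exact Or.inl hv
        · exact Or.inr ⟨h1, List.mem_cons.2 (Or.inr h2), h3⟩
      · intro h'
        rcases h' with hv | ⟨h1, h2, h3⟩
        · exact Or.inl (Or.inr hv)
        · rcases List.mem_cons.1 h2 with h2 | h2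
          · exact Or.inl (Or.inl ⟨h2, h1⟩)
          · exact Or.inr ⟨h1, h2, h3⟩
    · rename_i h
      rw [ih _ _ hsz]
      constructor
      · intro h'
        rcases h' with hv | ⟨h1, h2, h3⟩
        · exact Or.inl hv
        · exact Or.inr ⟨h1, List.mem_cons.2 (Or.inr h2), h3⟩
      · intro h'
        rcases h' with hv | ⟨h1, h2, h3⟩
        · exact Or.inl hv
        · rcases List.mem_cons.1 h2 with h2 | h2
          · exact absurd ⟨by omega, by omega⟩ h
          · exact Or.inr ⟨h1, h2, h3⟩

theorem expand_size (rest : List (Int × Int)) (qrev : List (Int × Int))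
    (visit : Array (PySem.Dict Int Bool)) :
    (pvExpand rest qrev visit).2.size = visit.size := by
  induction rest generalizing qrev visit with
  | nil => rfl
  | cons cur rest ih =>
    show (pvExpand rest _ _).2.size = _
    rw [ih, push_size]

theorem expand_spec_q (t : Int) (rest : List (Int × Int)) (qrev : List (Int × Int))
    (visit : Array (PySem.Dict Int Bool)) (ht : ∀ e ∈ rest, e.2 = t) (c t' : Int) :
    (c, t') ∈ (pvExpand rest qrev visit).1 ↔
      (c, t') ∈ qrev ∨ (t' = t + 1 ∧ ∃ p, (∃ u, (p, u) ∈ rest) ∧ childOf p c) := by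
  induction rest generalizing qrev visit with
  | nil => simp [pvExpand]
  | cons cur rest ih =>
    show (c, t') ∈ (pvExpand rest _ _).1 ↔ _
    rw [ih _ _ (fun e he => ht e (List.mem_cons.2 (Or.inr he)))]
    rw [push_spec_q]
    have hcur : cur.2 = t := ht cur (List.mem_cons.2 (Or.inl rfl))
    constructor
    · intro h'
      rcases h' with (h' | ⟨h1, h2⟩) | ⟨h1, p, ⟨u, hu⟩, hc⟩
      · exact Or.inl h'
      · exact Or.inr ⟨by omega, cur.1, ⟨cur.2, List.mem_cons.2 (Or.inl rfl)⟩,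
          (mem_three cur.1 c).1 ⟨h2.1, h2.2⟩⟩
      · exact Or.inr ⟨h1, p, ⟨u, List.mem_cons.2 (Or.inr hu)⟩, hc⟩
    · intro h'
      rcases h' with h' | ⟨h1, p, ⟨u, hu⟩, hc⟩
      · exact Or.inl (Or.inl h')
      · rcases List.mem_cons.1 hu with hu | hu
        · have hp : p = cur.1 := by rw [← hu]
          have h3 := (mem_three p c).2 hc
          rw [hp] at h3
          exact Or.inl (Or.inr ⟨by omega, h3.1, h3.2⟩)
        · exact Or.inr ⟨h1, p, ⟨u, hu⟩, hc⟩

theorem expand_spec_v (t : Int) (rest : List (Int × Int)) (qrev : List (Int × Int))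
    (visit : Array (PySem.Dict Int Bool)) (hsz : visit.size = 200001)
    (ht : ∀ e ∈ rest, e.2 = t) (c u : Int) (hc : 0 ≤ c) :
    lkA (pvExpand rest qrev visit).2 c u = true ↔
      lkA visit c u = true ∨ (u = t + 1 ∧ ∃ p, (∃ u', (p, u') ∈ rest) ∧ childOf p c) := by
  induction rest generalizing qrev visit with
  | nil => simp [pvExpand]
  | cons cur rest ih =>
    show lkA (pvExpand rest _ _).2 c u = true ↔ _
    rw [ih _ _ (by rw [push_size]; exact hsz) (fun e he => ht e (List.mem_cons.2 (Or.inr he)))]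
    rw [push_spec_v _ _ _ _ hsz _ _ hc]
    have hcur : cur.2 = t := ht cur (List.mem_cons.2 (Or.inl rfl))
    constructor
    · intro h'
      rcases h' with (h' | ⟨h1, h2⟩) | ⟨h1, p, ⟨u', hu⟩, hcof⟩
      · exact Or.inl h'
      · exact Or.inr ⟨by omega, cur.1, ⟨cur.2, List.mem_cons.2 (Or.inl rfl)⟩,
          (mem_three cur.1 c).1 ⟨h2.1, h2.2⟩⟩
      · exact Or.inr ⟨h1, p, ⟨u', List.mem_cons.2 (Or.inr hu)⟩, hcof⟩
    · intro h'
      rcases h' with h' | ⟨h1, p, ⟨u', hu⟩, hcof⟩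
      · exact Or.inl (Or.inl h')
      · rcases List.mem_cons.1 hu with hu | hu
        · have hp : p = cur.1 := by rw [← hu]
          have h3 := (mem_three p c).2 hcof
          rw [hp] at h3
          exact Or.inl (Or.inr ⟨by omega, h3.1, h3.2⟩)
        · exact Or.inr ⟨h1, p, ⟨u', hu⟩, hcof⟩

-- ---------- B-side: one level of the dedup BFS ----------

theorem childB_spec (cs : List Int) : ∀ (newReach : Array Bool) (newFrontier : List Int),
    newReach.size = 200001 → (∀ x ∈ newFrontier, 0 ≤ x) →
    (∀ x : Int, 0 ≤ x → (newReach.getD x.toNat false = true ↔ x ∈ newFrontier)) →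
    (pvChildB cs newReach newFrontier).1.size = 200001 ∧
    (∀ x ∈ (pvChildB cs newReach newFrontier).2, 0 ≤ x) ∧
    (∀ x : Int, 0 ≤ x →
      ((pvChildB cs newReach newFrontier).1.getD x.toNat false = true ↔
        x ∈ (pvChildB cs newReach newFrontier).2)) ∧
    (∀ x : Int, 0 ≤ x →
      ((pvChildB cs newReach newFrontier).1.getD x.toNat false = true ↔
        (newReach.getD x.toNat false = true ∨ (x ∈ cs ∧ x ≤ 200000)))) := by
  induction cs with
  | nil =>
    intro newReach newFrontier hsz hnn hpair
    refine ⟨hsz, hnn, hpair, ?_⟩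
    intro x hx
    rw [pvChildB]
    simp
  | cons c cs ih =>
    intro newReach newFrontier hsz hnn hpair
    show (pvChildB (c :: cs) newReach newFrontier).1.size = 200001 ∧ _
    rw [pvChildB]
    split
    · rename_i hcond
      obtain ⟨⟨hc0, hc1⟩, hmark⟩ := hcond
      have hsz' : (newReach.setIfInBounds c.toNat true).size = 200001 := by
        rw [Array.size_setIfInBounds]; exact hsz
      have hpair' : ∀ x : Int, 0 ≤ x →
          ((newReach.setIfInBounds c.toNat true).getD x.toNat false = true ↔ x ∈ c :: newFrontier) := by
        intro x hx
        rw [getD_setIfInBounds _ _ _ _ _ (by omega), List.mem_cons]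
        by_cases hxc : x.toNat = c.toNat
        · have : x = c := by omega
          simp [this]
        · have : ¬ x = c := by omega
          simp only [if_neg hxc, hpair x hx, this, false_or]
      have hnn' : ∀ x ∈ c :: newFrontier, 0 ≤ x := by
        intro x hxm
        rcases List.mem_cons.1 hxm with h | h
        · omega
        · exact hnn x h
      obtain ⟨s1, s2, s3, s4⟩ := ih (newReach.setIfInBounds c.toNat true) (c :: newFrontier) hsz' hnn' hpair'
      refine ⟨s1, s2, s3, ?_⟩
      intro x hx
      rw [s4 x hx, getD_setIfInBounds _ _ _ _ _ (by omega), List.mem_cons]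
      by_cases hxc : x.toNat = c.toNat
      · have hxc' : x = c := by omega
        simp [hxc']; omega
      · have hxc' : ¬ x = c := by omega
        rw [if_neg hxc]
        constructor
        · rintro (h | h)
          · exact Or.inl h
          · exact Or.inr ⟨Or.inr h.1, h.2⟩
        · rintro (h | ⟨h1 | h1, h2⟩)
          · exact Or.inl h
          · exact absurd h1 hxc'
          · exact Or.inr ⟨h1, h2⟩
    · rename_i hcond
      obtain ⟨s1, s2, s3, s4⟩ := ih newReach newFrontier hsz hnn hpair
      refine ⟨s1, s2, s3, ?_⟩
      intro x hx
      rw [s4 x hx, List.mem_cons]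
      -- the skipped child c is either off the board or already marked
      constructor
      · rintro (h | h)
        · exact Or.inl h
        · exact Or.inr ⟨Or.inr h.1, h.2⟩
      · rintro (h | ⟨h1 | h1, h2⟩)
        · exact Or.inl h
        · subst h1
          rcases Decidable.not_and_iff_or_not.1 hcond with h' | h'
          · exact absurd ⟨hx, h2⟩ h'
          · exact Or.inl (by revert h'; cases hb : newReach.getD x.toNat false <;> simp)
        · exact Or.inr ⟨h1, h2⟩

theorem levelB_spec (ps : List Int) : ∀ (newReach : Array Bool) (newFrontier : List Int),
    newReach.size = 200001 → (∀ x ∈ newFrontier, 0 ≤ x) →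
    (∀ x : Int, 0 ≤ x → (newReach.getD x.toNat false = true ↔ x ∈ newFrontier)) →
    (pvLevelB ps newReach newFrontier).1.size = 200001 ∧
    (∀ x ∈ (pvLevelB ps newReach newFrontier).2, 0 ≤ x) ∧
    (∀ x : Int, 0 ≤ x →
      ((pvLevelB ps newReach newFrontier).1.getD x.toNat false = true ↔
        x ∈ (pvLevelB ps newReach newFrontier).2)) ∧
    (∀ x : Int, 0 ≤ x →
      ((pvLevelB ps newReach newFrontier).1.getD x.toNat false = true ↔
        (newReach.getD x.toNat false = true ∨ ∃ p ∈ ps, childOf p x))) := by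
  induction ps with
  | nil =>
    intro newReach newFrontier hsz hnn hpair
    refine ⟨hsz, hnn, hpair, ?_⟩
    intro x hx
    rw [pvLevelB]
    simp
  | cons p ps ih =>
    intro newReach newFrontier hsz hnn hpair
    simp only [pvLevelB]
    obtain ⟨c1, c2, c3, c4⟩ := childB_spec [p - 1, p + 1, 2 * p] newReach newFrontier hsz hnn hpair
    obtain ⟨s1, s2, s3, s4⟩ := ih _ _ c1 c2 c3
    refine ⟨s1, s2, s3, ?_⟩
    intro x hx
    rw [s4 x hx, c4 x hx]
    have hthree : (x ∈ [p - 1, p + 1, 2 * p] ∧ x ≤ 200000) ↔ childOf p x := by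
      rw [← mem_three p x]
      constructor
      · rintro ⟨h1, h2⟩
        refine ⟨?_, hx, h2⟩
        simp only [List.mem_cons, List.not_mem_nil, or_false] at h1 ⊢
        omega
      · rintro ⟨h1, _, h2⟩
        refine ⟨?_, h2⟩
        simp only [List.mem_cons, List.not_mem_nil, or_false] at h1 ⊢
        omega
    constructor
    · rintro ((h | h) | ⟨q, hq1, hq2⟩)
      · exact Or.inl h
      · exact Or.inr ⟨p, List.mem_cons.2 (Or.inl rfl), hthree.1 h⟩
      · exact Or.inr ⟨q, List.mem_cons.2 (Or.inr hq1), hq2⟩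
    · rintro (h | ⟨q, hq1, hq2⟩)
      · exact Or.inl (Or.inl h)
      · rcases List.mem_cons.1 hq1 with hq1 | hq1
        · subst hq1
          exact Or.inl (Or.inr (hthree.2 hq2))
        · exact Or.inr ⟨q, hq1, hq2⟩

-- ---------- the two loops agree round by round ----------

theorem loop_eq (fuel : Nat) : ∀ (cony time : Int) (q : List (Int × Int))
    (visit : Array (PySem.Dict Int Bool)) (reach : Array Bool) (frontier : List Int),
    -200001 ≤ cony → cony ≤ 200000 → 0 ≤ time →
    visit.size = 200001 → reach.size = 200001 →
    (∀ e ∈ q, e.2 = time ∧ 0 ≤ e.1 ∧ e.1 ≤ 200000) →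
    (∀ p ∈ frontier, 0 ≤ p) →
    (∀ c : Int, 0 ≤ c → (reach.getD c.toNat false = true ↔ c ∈ frontier)) →
    (∀ c : Int, 0 ≤ c → ((∃ t', (c, t') ∈ q) ↔ c ∈ frontier)) →
    (∀ c : Int, 0 ≤ c → (lkA visit c time = true ↔ c ∈ frontier)) →
    (∀ c u : Int, 0 ≤ c → time < u → lkA visit c u = false) →
    pvLoopA fuel cony time q visit = pvLoopB fuel cony time reach frontier := by
  induction fuel with
  | zero => intros; rfl
  | succ fuel ih =>
    intro cony time q visit reach frontier hlo hhi htm hszv hszr hqe hfb hpair hq hv hf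
    rw [pvLoopA, pvLoopB]
    simp only [pvMAX_eq, lkA_def]
    rw [if_pos hhi]
    by_cases hcm : cony + time > 200000
    · rw [if_pos hcm, if_pos hcm]
    · rw [if_neg hcm, if_neg hcm]
      -- the (possibly wrapped) index both Pythons read is the same on-board cell
      set w : Int := pvVisitIdx (cony + time) with hw
      have hwidx : (if cony + time < 0 then cony + time + 200001 else cony + time) = w := by
        rw [hw, pvVisitIdx_eq]
      have hw0 : 0 ≤ w := by rw [hw, pvVisitIdx_eq]; split <;> omega
      rw [hwidx]
      by_cases hhit : w ∈ frontier
      · rw [if_pos ((hv w hw0).2 hhit), if_pos ((hpair w hw0).2 hhit)]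
      · rw [if_neg (fun h => hhit ((hv w hw0).1 h)), if_neg (fun h => hhit ((hpair w hw0).1 h))]
        have htq : ∀ e ∈ q, e.2 = time := fun e he => (hqe e he).1
        obtain ⟨l1, l2, l3, l4⟩ := levelB_spec frontier (Array.replicate 200001 false) []
          (Array.size_replicate ..) (by simp) (by intro x hx; rw [getD_replicate]; simp)
        have hlev : ∀ x : Int, 0 ≤ x →
            ((pvLevelB frontier (Array.replicate 200001 false) []).1.getD x.toNat false = true ↔
              ∃ p ∈ frontier, childOf p x) := by
          intro x hx
          rw [l4 x hx, getD_replicate]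
          by_cases h : x.toNat < 200001 <;> simp [h]
        refine ih (cony + time) (time + 1) _ _ _ _ (by omega) (by omega) (by omega)
          (by rw [expand_size]; exact hszv) l1 ?_ ?_ ?_ ?_ ?_ ?_
        · -- the new queue holds the next time's on-board cells
          intro e he
          rw [List.mem_reverse] at he
          rcases (expand_spec_q time q [] visit htq e.1 e.2).1 (by simpa using he) with
            h' | ⟨h1, p, _, hcof⟩
          · exact absurd h' (List.not_mem_nil)
          · exact ⟨h1, hcof.2.1, hcof.2.2⟩
        · intro p hp
          rw [List.mem_reverse] at hp
          exact l2 p hp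
        · intro c hc
          rw [List.mem_reverse]
          exact l3 c hc
        · intro c hc
          rw [List.mem_reverse]
          rw [← l3 c hc, hlev c hc]
          constructor
          · rintro ⟨t', hmem⟩
            rw [List.mem_reverse] at hmem
            rcases (expand_spec_q time q [] visit htq c t').1 hmem with h' | ⟨_, p, ⟨u, hu⟩, hcof⟩
            · exact absurd h' (List.not_mem_nil)
            · have hp0 : 0 ≤ p := ((hqe (p, u) hu).2).1
              exact ⟨p, (hq p hp0).1 ⟨u, hu⟩, hcof⟩
          · rintro ⟨p, hp, hcof⟩
            have hp0 : 0 ≤ p := hfb p hp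
            rcases (hq p hp0).2 hp with ⟨u, hu⟩
            exact ⟨time + 1, List.mem_reverse.2 ((expand_spec_q time q [] visit htq c (time + 1)).2
              (Or.inr ⟨rfl, p, ⟨u, hu⟩, hcof⟩))⟩
        · intro c hc
          rw [List.mem_reverse, ← l3 c hc, hlev c hc,
            expand_spec_v time q [] visit hszv htq c (time + 1) hc]
          constructor
          · rintro (h' | ⟨_, p, ⟨u', hu⟩, hcof⟩)
            · rw [hf c (time + 1) hc (by omega)] at h'
              exact absurd h' (by simp)
            · have hp0 : 0 ≤ p := ((hqe (p, u') hu).2).1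
              exact ⟨p, (hq p hp0).1 ⟨u', hu⟩, hcof⟩
          · rintro ⟨p, hp, hcof⟩
            have hp0 : 0 ≤ p := hfb p hp
            rcases (hq p hp0).2 hp with ⟨u', hu⟩
            exact Or.inr ⟨rfl, p, ⟨u', hu⟩, hcof⟩
        · intro c u hc hu
          rw [← Bool.not_eq_true, expand_spec_v time q [] visit hszv htq c u hc]
          rintro (h' | ⟨h1', _⟩)
          · rw [hf c u hc (by omega)] at h'
            exact absurd h' (by simp)
          · omega

-- ===== VERDICT (by name: the statement is the Claim_ definition above) =====
theorem solution_spec : Claim_equal_solution := by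
  intro cony brown _ hpre
  obtain ⟨hlo, hhi⟩ := hpre
  unfold Spec_solution solution solution_alt
  -- round 0 of A: the check on the still-empty visit fails and the initial queue is expanded
  show pvLoopA (1999 + 1) cony 0 [(brown, 0)] _ = _
  rw [pvLoopA]
  simp only [pvMAX_eq]
  rw [if_pos (by omega), if_neg (by omega),
    if_neg (by rw [lkA_def, lkA_replicate]; simp)]
  have htinit : ∀ e ∈ [((brown : Int), (0 : Int))], e.2 = (0 : Int) := by
    intro e he; simp only [List.mem_singleton] at he; rw [he]
  -- B's seeding of the first frontier = the children of Brown's start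
  obtain ⟨c1, c2, c3, c4⟩ := childB_spec [brown - 1, brown + 1, 2 * brown]
    (Array.replicate 200001 false) [] (Array.size_replicate ..) (by simp)
    (by intro x hx; rw [getD_replicate]; simp)
  have hseed : ∀ x : Int, 0 ≤ x →
      (x ∈ (pvChildB [brown - 1, brown + 1, 2 * brown] (Array.replicate 200001 false) []).2 ↔
        childOf brown x) := by
    intro x hx
    rw [← c3 x hx, c4 x hx, getD_replicate]
    simp only [ite_self, Bool.false_eq_true, false_or, List.mem_cons, List.not_mem_nil,
      or_false, childOf]
    constructor
    · rintro ⟨h1, h2⟩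
      exact ⟨by omega, hx, h2⟩
    · rintro ⟨h1, _, h2⟩
      exact ⟨by omega, h2⟩
  simp only [add_zero, zero_add]
  refine loop_eq 1999 cony 1 _ _ _ _ (by omega) (by omega) (by omega)
    (by rw [expand_size]; simp) c1 ?_ ?_ ?_ ?_ ?_ ?_
  · intro e he
    rw [List.mem_reverse] at he
    rcases (expand_spec_q 0 [(brown, 0)] [] _ htinit e.1 e.2).1 (by simpa using he) with
      h' | ⟨h1, p, _, hcof⟩
    · exact absurd h' (List.not_mem_nil)
    · exact ⟨by omega, hcof.2.1, hcof.2.2⟩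
  · intro p hp
    rw [List.mem_reverse] at hp
    exact c2 p hp
  · intro c hc
    rw [List.mem_reverse]
    exact c3 c hc
  · intro c hc
    rw [List.mem_reverse, hseed c hc]
    constructor
    · rintro ⟨t', hmem⟩
      rw [List.mem_reverse] at hmem
      rcases (expand_spec_q 0 [(brown, 0)] [] _ htinit c t').1 hmem with h' | ⟨_, p, ⟨u, hu⟩, hcof⟩
      · exact absurd h' (List.not_mem_nil)
      · simp only [List.mem_singleton, Prod.mk.injEq] at hu
        rwa [← hu.1]
    · intro hcof
      exact ⟨1, List.mem_reverse.2 ((expand_spec_q 0 [(brown, 0)] [] _ htinit c 1).2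
        (Or.inr ⟨by norm_num, brown, ⟨0, List.mem_singleton.2 rfl⟩, hcof⟩))⟩
  · intro c hc
    rw [List.mem_reverse, hseed c hc,
      expand_spec_v 0 [(brown, 0)] [] _ (Array.size_replicate ..) htinit c 1 hc]
    constructor
    · rintro (h' | ⟨_, p, ⟨u', hu⟩, hcof⟩)
      · rw [lkA_replicate] at h'
        exact absurd h' (by simp)
      · simp only [List.mem_singleton, Prod.mk.injEq] at hu
        rwa [← hu.1]
    · intro hcof
      exact Or.inr ⟨by norm_num, brown, ⟨0, List.mem_singleton.2 rfl⟩, hcof⟩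
  · intro c u hc hu
    rw [← Bool.not_eq_true,
      expand_spec_v 0 [(brown, 0)] [] _ (Array.size_replicate ..) htinit c u hc]
    rintro (h' | ⟨h1', _⟩)
    · rw [lkA_replicate] at h'
      exact absurd h' (by simp)
    · omega
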